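-- pv_equiv track=rewrite | github.com/FAIZANTKHAN/DSA_Python | DSA31_Pair Sum XOR of an Array.py | pair_sum_xor_naive
-- ===== SOURCE A (Python) =====
-- def pair_sum_xor_naive(arr):
--     n = len(arr)
--     result = 0
--
--     # Iterate over all pairs
--     for i in range(n):
--         for j in range(i + 1, n):
--             # Calculate sum of the pair
--             pair_sum = arr[i] + arr[j]
--             # Update the result with XOR of the pair sum
--             result ^= pair_sum
--
--     return result
-- ===== SOURCE B (Python) =====
-- def pair_sum_xor_naive(arr):
--     # Consume the array back-to-front: pop the last element and fold in
--     # its sums with everything still on the stack.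
--     result = 0
--     stack = list(arr)
--     while stack:
--         x = stack.pop()
--         for y in stack:
--             result ^= y + x
--     return result
-- ===== Notes on version B (the rewrite author's own statement) =====
-- stated objective: alternative
-- what changed: B replaces A's nested index loops over range(n) x range(i+1,n) with an explicit stack consumed back-to-front: pop the last element and XOR in its sums with everything remaining, relying on XOR's commutativity/associativity for exactness.
import Mathlib
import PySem

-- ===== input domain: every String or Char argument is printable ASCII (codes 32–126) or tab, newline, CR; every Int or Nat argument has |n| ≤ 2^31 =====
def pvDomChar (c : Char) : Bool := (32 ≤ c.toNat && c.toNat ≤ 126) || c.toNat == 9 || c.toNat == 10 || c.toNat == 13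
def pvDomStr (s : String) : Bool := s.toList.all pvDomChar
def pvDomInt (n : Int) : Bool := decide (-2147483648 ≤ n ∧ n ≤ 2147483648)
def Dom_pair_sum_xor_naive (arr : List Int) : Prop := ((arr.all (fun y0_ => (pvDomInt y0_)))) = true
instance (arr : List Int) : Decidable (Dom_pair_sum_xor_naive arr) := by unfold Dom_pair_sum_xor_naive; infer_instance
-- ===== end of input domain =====

-- B consumes the array back-to-front with an explicit stack (pop + fold over the
-- remainder) instead of A's nested index loops; same O(n^2) cost, alternative structure.

-- ===== PORT A =====
-- literal port of A's nested index loops over range(n) / range(i+1, n)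
def pair_sum_xor_naive (arr : List Int) : Int :=
  let n : Int := arr.length
  (PySem.List.pyRange 0 n 1).foldl (fun result i =>
    (PySem.List.pyRange (i + 1) n 1).foldl (fun result j =>
      PySem.Int.bxor result (PySem.List.pyGetD arr i 0 + PySem.List.pyGetD arr j 0)) result) 0

-- ===== PORT B =====
-- the 'while stack: x = stack.pop(); for y in stack: result ^= y + x' loop
def pvBWhile (result : Int) (stack : List Int) : Int :=
  if h : stack = [] then result
  else
    let x := stack.getLast h
    let stack' := stack.dropLast
    pvBWhile (stack'.foldl (fun r y => PySem.Int.bxor r (y + x)) result) stack'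
termination_by stack.length
decreasing_by
  simpa [List.length_dropLast] using Nat.sub_lt (List.length_pos_of_ne_nil h) one_pos

def pair_sum_xor_naive_alt (arr : List Int) : Int := pvBWhile 0 arr

-- ===== PRECONDITION & SPEC =====
def Spec_pair_sum_xor_naive (arr : List Int) (out : Int) : Prop := out = pair_sum_xor_naive_alt arr
instance (arr : List Int) (out : Int) : Decidable (Spec_pair_sum_xor_naive arr out) := by unfold Spec_pair_sum_xor_naive; infer_instance

-- ===== CLAIM (what is proved, stated in full; the proofs are below) =====
def Claim_equal_pair_sum_xor_naive : Prop := ∀ (arr : List Int), Dom_pair_sum_xor_naive arr → Spec_pair_sum_xor_naive arr (pair_sum_xor_naive arr)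

-- ===== LEMMAS AND PROOFS =====

-- associativity of Python's xor, via negSucc case analysis down to Nat.xor_assoc
theorem pvBxor_ofNat_negSucc (m n : Nat) : PySem.Int.bxor (m : Int) (Int.negSucc n) = Int.negSucc (m ^^^ n) := by
  have h1 : ¬ (0 : Int) ≤ Int.negSucc n := by rw [Int.negSucc_eq]; omega
  have h2 : (-(Int.negSucc n) - 1).toNat = n := by rw [Int.negSucc_eq]; omega
  unfold PySem.Int.bxor
  rw [if_pos (Int.natCast_nonneg m), if_neg h1, h2, Int.toNat_natCast, Int.negSucc_eq]
  omega

theorem pvBxor_negSucc_ofNat (m n : Nat) : PySem.Int.bxor (Int.negSucc m) (n : Int) = Int.negSucc (m ^^^ n) := by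
  have h1 : ¬ (0 : Int) ≤ Int.negSucc m := by rw [Int.negSucc_eq]; omega
  have h2 : (-(Int.negSucc m) - 1).toNat = m := by rw [Int.negSucc_eq]; omega
  unfold PySem.Int.bxor
  rw [if_neg h1, if_pos (Int.natCast_nonneg n), h2, Int.toNat_natCast, Int.negSucc_eq]
  omega

theorem pvBxor_negSucc_negSucc (m n : Nat) : PySem.Int.bxor (Int.negSucc m) (Int.negSucc n) = ((m ^^^ n : Nat) : Int) := by
  have h1 : ¬ (0 : Int) ≤ Int.negSucc m := by rw [Int.negSucc_eq]; omega
  have h1' : ¬ (0 : Int) ≤ Int.negSucc n := by rw [Int.negSucc_eq]; omega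
  have h2 : (-(Int.negSucc m) - 1).toNat = m := by rw [Int.negSucc_eq]; omega
  have h2' : (-(Int.negSucc n) - 1).toNat = n := by rw [Int.negSucc_eq]; omega
  unfold PySem.Int.bxor
  rw [if_neg h1, if_neg h1', h2, h2']

theorem pvBxor_assoc (a b c : Int) :
    PySem.Int.bxor (PySem.Int.bxor a b) c = PySem.Int.bxor a (PySem.Int.bxor b c) := by
  cases a with
  | ofNat m => cases b with
    | ofNat n => cases c with
      | ofNat k => simp [Nat.xor_assoc]
      | negSucc k => simp [pvBxor_ofNat_negSucc, Nat.xor_assoc]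
    | negSucc n => cases c with
      | ofNat k => simp [pvBxor_ofNat_negSucc, pvBxor_negSucc_ofNat, Nat.xor_assoc]
      | negSucc k => simp [pvBxor_ofNat_negSucc, pvBxor_negSucc_negSucc, Nat.xor_assoc]
  | negSucc m => cases b with
    | ofNat n => cases c with
      | ofNat k => simp [pvBxor_negSucc_ofNat, Nat.xor_assoc]
      | negSucc k => simp [pvBxor_negSucc_ofNat, pvBxor_ofNat_negSucc, pvBxor_negSucc_negSucc, Nat.xor_assoc]
    | negSucc n => cases c with
      | ofNat k => simp [pvBxor_negSucc_negSucc, pvBxor_negSucc_ofNat, Nat.xor_assoc]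
      | negSucc k => simp [pvBxor_negSucc_negSucc, pvBxor_ofNat_negSucc, pvBxor_negSucc_ofNat, Nat.xor_assoc]

theorem pvBxor_zero_left (a : Int) : PySem.Int.bxor 0 a = a := by
  rw [PySem.Int.bxor_comm]; exact PySem.Int.bxor_zero a

-- xor-of-a-mapped-list, the common value both programs accumulate
def pvXorMap {α : Type} (g : α → Int) (l : List α) : Int :=
  l.foldl (fun r y => PySem.Int.bxor r (g y)) 0

theorem pvFoldl_bxor_shift {α : Type} (g : α → Int) (l : List α) :
    ∀ a, l.foldl (fun r y => PySem.Int.bxor r (g y)) a = PySem.Int.bxor a (pvXorMap g l) := by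
  induction l with
  | nil => intro a; simp [pvXorMap, PySem.Int.bxor_zero]
  | cons x t ih =>
    intro a
    simp only [List.foldl_cons, pvXorMap]
    rw [ih, ih (PySem.Int.bxor 0 (g x)), pvBxor_zero_left, pvBxor_assoc]

theorem pvXorMap_append {α : Type} (g : α → Int) (l1 l2 : List α) :
    pvXorMap g (l1 ++ l2) = PySem.Int.bxor (pvXorMap g l1) (pvXorMap g l2) := by
  unfold pvXorMap
  rw [List.foldl_append, pvFoldl_bxor_shift]
  rfl

theorem pvXorMap_cons {α : Type} (g : α → Int) (a : α) (l : List α) :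
    pvXorMap g (a :: l) = PySem.Int.bxor (g a) (pvXorMap g l) := by
  unfold pvXorMap
  rw [List.foldl_cons, pvFoldl_bxor_shift, pvBxor_zero_left]
  rfl

theorem pvXorMap_singleton {α : Type} (g : α → Int) (a : α) :
    pvXorMap g [a] = g a := by
  simp [pvXorMap, pvBxor_zero_left]

theorem pvXorMap_map {α β : Type} (g : β → Int) (f : α → β) (l : List α) :
    pvXorMap g (l.map f) = pvXorMap (fun x => g (f x)) l := by
  unfold pvXorMap
  rw [List.foldl_map]

theorem pvBxor_left_comm (a b c : Int) :
    PySem.Int.bxor a (PySem.Int.bxor b c) = PySem.Int.bxor b (PySem.Int.bxor a c) := by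
  rw [← pvBxor_assoc, PySem.Int.bxor_comm a b, pvBxor_assoc]

-- the canonical structural recursion both ports are reduced to
def pvP : List Int → Int
  | [] => 0
  | x :: r => PySem.Int.bxor (pvXorMap (fun y => x + y) r) (pvP r)

-- A = pvP, through a Nat-indexed middle form
def pvNatA (arr : List Int) : Int :=
  pvXorMap (fun k => pvXorMap (fun y => arr.getD k 0 + y) (arr.drop (k + 1))) (List.range arr.length)

theorem pvNatA_eq_P (arr : List Int) : pvNatA arr = pvP arr := by
  induction arr with
  | nil => simp [pvNatA, pvXorMap, pvP]
  | cons x r ih =>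
    unfold pvNatA pvP
    rw [List.length_cons, List.range_succ_eq_map, pvXorMap_cons, pvXorMap_map]
    simp only [List.getD_cons_zero, List.drop_succ_cons, List.drop_zero, List.getD_cons_succ,
      Nat.succ_eq_add_one]
    rw [← pvNatA]
    rw [ih]

theorem pvA_eq_NatA (arr : List Int) : pair_sum_xor_naive arr = pvNatA arr := by
  have hmem : ∀ (res : Int), ∀ i ∈ PySem.List.pyRange 0 ((arr.length : Int)) 1,
      (PySem.List.pyRange (i + 1) ((arr.length : Int)) 1).foldl
        (fun result j => PySem.Int.bxor result (PySem.List.pyGetD arr i 0 + PySem.List.pyGetD arr j 0)) res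
      = PySem.Int.bxor res (pvXorMap (fun y => PySem.List.pyGetD arr i 0 + y) (arr.drop (i + 1).toNat)) := by
    intro res i hi
    have hi0 : (0 : Int) ≤ i := (PySem.List.mem_pyRange_one.1 hi).1
    rw [PySem.List.foldl_pyRange_pyGetD' arr 0
      (fun r y => PySem.Int.bxor r (PySem.List.pyGetD arr i 0 + y)) res (by omega)]
    exact pvFoldl_bxor_shift _ _ res
  unfold pair_sum_xor_naive
  rw [PySem.List.foldl_congr_mem _ _
      (fun res i => PySem.Int.bxor res
        (pvXorMap (fun y => PySem.List.pyGetD arr i 0 + y) (arr.drop (i + 1).toNat))) 0 hmem]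
  show pvXorMap _ _ = _
  rw [PySem.List.pyRange_one, pvXorMap_map]
  unfold pvNatA
  congr 1
  funext k
  have hk : (((k : Int)) + 1).toNat = k + 1 := by omega
  simp [hk, PySem.List.pyGetD_natCast]

theorem pvA_eq_P (arr : List Int) : pair_sum_xor_naive arr = pvP arr := by
  rw [pvA_eq_NatA, pvNatA_eq_P]

-- B = pvP
theorem pvP_append_singleton (x : Int) (l : List Int) :
    pvP (l ++ [x]) = PySem.Int.bxor (pvXorMap (fun y => y + x) l) (pvP l) := by
  induction l with
  | nil => simp [pvP, pvXorMap]
  | cons a t ih =>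
    show pvP (a :: (t ++ [x])) = _
    unfold pvP
    rw [ih, pvXorMap_append, pvXorMap_singleton, pvXorMap_cons]
    simp only [pvBxor_assoc, pvBxor_left_comm, PySem.Int.bxor_comm]

theorem pvBWhile_eq (l : List Int) : ∀ a, pvBWhile a l = PySem.Int.bxor a (pvP l) := by
  induction l using List.reverseRecOn with
  | nil => intro a; rw [pvBWhile]; simp [pvP, PySem.Int.bxor_zero]
  | append_singleton init x ih =>
    intro a
    rw [pvBWhile]
    simp only [List.getLast_concat, List.dropLast_concat, dite_eq_ite, if_neg]
    rw [pvFoldl_bxor_shift (fun y => y + x) init a, ih, pvP_append_singleton, pvBxor_assoc]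
    simp

theorem pvB_eq_P (arr : List Int) : pair_sum_xor_naive_alt arr = pvP arr := by
  unfold pair_sum_xor_naive_alt
  rw [pvBWhile_eq, pvBxor_zero_left]

-- ===== VERDICT (by name: the statement is the Claim_ definition above) =====
theorem pair_sum_xor_naive_spec : Claim_equal_pair_sum_xor_naive := by
  intro arr _
  unfold Spec_pair_sum_xor_naive
  rw [pvA_eq_P, pvB_eq_P]
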